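-- pv_equiv track=rewrite | github.com/pypi-data/pypi-mirror-403 | packages/fontquery/fontquery-1.32.tar.gz/fontquery-1.32/fontquery/htmlformatter.py | json2langgroup
-- ===== SOURCE A (Python) =====
-- from typing import Any, Dict, Iterator
--
-- def get_for_alias(value, symbol, prop):
--     return value[symbol][prop] if symbol in value and prop in value[symbol] else ''
--
-- def get_family_for_alias(value, symbol):
--     return get_for_alias(value, symbol, 'family')
--
-- def json2langgroup(data: dict[str, Any]) -> dict[str, dict[str, Any]]:
--     """Restructure JSON format by language group."""
--     retval = {}
--     for k, v in data.items():
--         key = f'{get_family_for_alias(v, "sans-serif")}|'\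
--             f'{get_family_for_alias(v, "serif")}|'\
--             f'{get_family_for_alias(v, "monospace")}|'\
--             f'{get_family_for_alias(v, "system-ui")}'
--         if key not in retval:
--             retval[key] = {}
--         retval[key][k] = v
--
--     return retval
-- ===== SOURCE B (Python) =====
-- def json2langgroup(data):
--     """Restructure JSON format by language group."""
--     def groupkey(v):
--         return '|'.join(v.get(s, {}).get('family', '')
--                         for s in ('sans-serif', 'serif', 'monospace', 'system-ui'))
--
--     def go(items):
--         if not items:
--             return {}
--         key = groupkey(items[0][1])
--         out = {key: {k: v for k, v in items if groupkey(v) == key}}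
--         out.update(go([(k, v) for k, v in items if groupkey(v) != key]))
--         return out
--
--     return go(list(data.items()))
-- ===== Notes on version B (the rewrite author's own statement) =====
-- stated objective: alternative
-- what changed: A makes one left-to-right pass mutating a nested dict with conditional group creation; B recursively peels off whole groups: it takes the head entry's key, filters all entries with that key into one group, recurses on the filtered-out remainder and concatenates the groups.
import Mathlib
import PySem

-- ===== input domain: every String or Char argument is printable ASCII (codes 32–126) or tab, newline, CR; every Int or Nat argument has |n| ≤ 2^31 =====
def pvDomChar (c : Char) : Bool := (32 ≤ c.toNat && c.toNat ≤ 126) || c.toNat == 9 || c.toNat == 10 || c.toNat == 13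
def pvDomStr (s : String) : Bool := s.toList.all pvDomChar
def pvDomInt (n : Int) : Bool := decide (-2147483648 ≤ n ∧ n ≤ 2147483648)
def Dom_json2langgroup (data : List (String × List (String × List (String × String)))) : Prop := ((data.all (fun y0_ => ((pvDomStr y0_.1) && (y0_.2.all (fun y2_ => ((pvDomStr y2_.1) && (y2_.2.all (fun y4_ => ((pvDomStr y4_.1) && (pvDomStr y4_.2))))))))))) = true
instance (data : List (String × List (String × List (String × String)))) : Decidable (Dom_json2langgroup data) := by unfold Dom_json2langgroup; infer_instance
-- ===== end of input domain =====

-- B replaces A's single mutating pass by a recursive group-peeling decomposition: take the head entry's key, filter that whole group out, recurse on the remainder (alternative, same results).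

-- ===== PORT A =====
-- value[symbol][prop] if symbol in value and prop in value[symbol] else ''
def pvGetForAlias (value : List (String × List (String × String))) (symbol prop : String) : String :=
  let d := PySem.Dict.mk value
  if d.contains symbol && (PySem.Dict.mk (d.getD symbol [])).contains prop then
    (PySem.Dict.mk (d.getD symbol [])).getD prop ""
  else ""

def pvGetFamilyForAlias (value : List (String × List (String × String))) (symbol : String) : String :=
  pvGetForAlias value symbol "family"

-- the f-string key f'{…}|{…}|{…}|{…}'
def pvKeyA (v : List (String × List (String × String))) : String :=
  pvGetFamilyForAlias v "sans-serif" ++ "|" ++ pvGetFamilyForAlias v "serif" ++ "|"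
    ++ pvGetFamilyForAlias v "monospace" ++ "|" ++ pvGetFamilyForAlias v "system-ui"

def json2langgroup (data : List (String × List (String × List (String × String)))) : List (String × List (String × List (String × List (String × String)))) :=
  let retval :=
    data.foldl (fun retval kv =>
      let key := pvKeyA kv.2
      let retval := if retval.contains key then retval else retval.insert key PySem.Dict.empty
      retval.modify key PySem.Dict.empty (fun g => g.insert kv.1 kv.2))
      (PySem.Dict.empty : PySem.Dict String (PySem.Dict String (List (String × List (String × String)))))
  retval.items.map (fun p => (p.1, p.2.items))

-- ===== PORT B =====
-- '|'.join(v.get(s, {}).get('family', '') for s in (...))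
def pvKeyB (v : List (String × List (String × String))) : String :=
  PySem.Str.join "|" (["sans-serif", "serif", "monospace", "system-ui"].map
    (fun s => (PySem.Dict.mk ((PySem.Dict.mk v).getD s [])).getD "family" ""))

-- go(items): peel off the whole group of the first entry, recurse on the rest
def pvGo : List (String × List (String × List (String × String))) →
    PySem.Dict String (PySem.Dict String (List (String × List (String × String))))
  | [] => PySem.Dict.empty
  | x :: xs =>
      let key := pvKeyB x.2
      let grouped := ((x :: xs).filter (fun kv => pvKeyB kv.2 == key)).foldl
        (fun g kv => g.insert kv.1 kv.2) PySem.Dict.empty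
      let rest := (x :: xs).filter (fun kv => !(pvKeyB kv.2 == key))
      PySem.Dict.update (PySem.Dict.empty.insert key grouped) (pvGo rest).items
  termination_by l => l.length
  decreasing_by
    simp only [List.filter_cons, beq_self_eq_true, Bool.not_true, Bool.false_eq_true,
      if_false, List.length_cons]
    exact Nat.lt_succ_of_le (List.length_filter_le _ _)

def json2langgroup_alt (data : List (String × List (String × List (String × String)))) : List (String × List (String × List (String × List (String × String)))) :=
  (pvGo data).items.map (fun p => (p.1, p.2.items))

-- ===== PRECONDITION & SPEC =====
def Spec_json2langgroup (data : List (String × List (String × List (String × String)))) (out : List (String × List (String × List (String × List (String × String))))) : Prop := out = json2langgroup_alt data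
instance (data : List (String × List (String × List (String × String)))) (out : List (String × List (String × List (String × List (String × String))))) : Decidable (Spec_json2langgroup data out) := by
  unfold Spec_json2langgroup
  have h1 : DecidableEq (List (String × List (String × String))) := inferInstance
  have h2 : DecidableEq (String × List (String × List (String × String))) := inferInstance
  have h3 : DecidableEq (List (String × List (String × List (String × String)))) := inferInstance
  infer_instance

-- ===== CLAIM (what is proved, stated in full; the proofs are below) =====
def Claim_equal_json2langgroup : Prop := ∀ (data : List (String × List (String × List (String × String)))), Dom_json2langgroup data → Spec_json2langgroup data (json2langgroup data)

-- ===== LEMMAS AND PROOFS =====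

-- A's loop body, named for the proofs
def pvStep (retval : PySem.Dict String (PySem.Dict String (List (String × List (String × String)))))
    (kv : String × List (String × List (String × String))) :
    PySem.Dict String (PySem.Dict String (List (String × List (String × String)))) :=
  let key := pvKeyA kv.2
  let retval := if retval.contains key then retval else retval.insert key PySem.Dict.empty
  retval.modify key PySem.Dict.empty (fun g => g.insert kv.1 kv.2)

-- the group of one key, named for the proofs
def pvGroup (l : List (String × List (String × List (String × String)))) (key : String) :
    PySem.Dict String (List (String × List (String × String))) :=
  (l.filter (fun kv => pvKeyA kv.2 == key)).foldl (fun g kv => g.insert kv.1 kv.2) PySem.Dict.empty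

def pvSeen (l : List (String × List (String × List (String × String)))) : List String :=
  PySem.List.dedup (l.map (fun kv => pvKeyA kv.2))

theorem pvAliasEq (v : List (String × List (String × String))) (s : String) :
    (PySem.Dict.mk ((PySem.Dict.mk v).getD s [])).getD "family" "" = pvGetFamilyForAlias v s := by
  unfold pvGetFamilyForAlias pvGetForAlias
  by_cases h : (PySem.Dict.mk v).contains s = true
  · by_cases h2 : (PySem.Dict.mk ((PySem.Dict.mk v).getD s [])).contains "family" = true
    · simp [h, h2]
    · simp only [h, Bool.true_and, h2, if_false, Bool.false_eq_true]
      exact PySem.Dict.getD_of_not_contains _ _ (Bool.eq_false_iff.mpr h2)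
  · have hd : (PySem.Dict.mk v).getD s [] = [] :=
      PySem.Dict.getD_of_not_contains _ _ (Bool.eq_false_iff.mpr h)
    simp [h, hd]
    rfl

theorem pvKeyB_eq (v : List (String × List (String × String))) : pvKeyB v = pvKeyA v := by
  apply String.ext
  simp [pvKeyB, pvKeyA, pvAliasEq, PySem.Str.join, PySem.Chars.join, List.intercalate,
    String.toList_append]

theorem pvGroup_snoc (l : List (String × List (String × List (String × String))))
    (x : String × List (String × List (String × String))) (key : String) :
    pvGroup (l ++ [x]) key =
      if pvKeyA x.2 == key then (pvGroup l key).insert x.1 x.2 else pvGroup l key := by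
  simp only [pvGroup, List.filter_append, List.filter_cons, List.filter_nil]
  by_cases h : pvKeyA x.2 == key
  · simp [h, List.foldl_append]
  · simp [h]

theorem pvGroup_empty_of_not_mem (l : List (String × List (String × List (String × String))))
    (key : String) (h : key ∉ pvSeen l) : pvGroup l key = PySem.Dict.empty := by
  have hfil : l.filter (fun kv => pvKeyA kv.2 == key) = [] := by
    rw [List.filter_eq_nil_iff]
    intro kv hkv
    simp only [beq_iff_eq]
    intro hk
    exact h (by
      simp only [pvSeen, PySem.List.mem_dedup]
      exact hk ▸ List.mem_map.mpr ⟨kv, hkv, rfl⟩)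
  simp [pvGroup, hfil]

theorem pvDedup_snoc (ys : List String) (y : String) :
    PySem.List.dedup (ys ++ [y]) = PySem.Set.add (PySem.List.dedup ys) y := by
  rw [PySem.List.dedup_eq_ofList, PySem.List.dedup_eq_ofList,
    PySem.Set.ofList_eq_foldl, PySem.Set.ofList_eq_foldl, List.foldl_append]
  rfl

theorem pvSeen_snoc (l : List (String × List (String × List (String × String))))
    (x : String × List (String × List (String × String))) :
    pvSeen (l ++ [x]) = PySem.Set.add (pvSeen l) (pvKeyA x.2) := by
  simp only [pvSeen, List.map_append, List.map_cons, List.map_nil]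
  exact pvDedup_snoc _ _

-- the loop invariant: A's dict after the fold IS the (seen, group) table
theorem pvInv (l : List (String × List (String × List (String × String)))) :
    (l.foldl pvStep PySem.Dict.empty).items = (pvSeen l).map (fun key => (key, pvGroup l key)) := by
  induction l using List.reverseRecOn with
  | nil => rfl
  | append_singleton l x ih =>
    rw [List.foldl_append]
    simp only [List.foldl_cons, List.foldl_nil]
    have hnodup : (pvSeen l).Nodup := PySem.List.nodup_dedup _
    have hkeys : (l.foldl pvStep PySem.Dict.empty).keys = pvSeen l := by
      have h := congrArg (List.map Prod.fst) ih
      simpa [PySem.Dict.keys, List.map_map, Function.comp_def] using h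
    by_cases hmem : pvKeyA x.2 ∈ pvSeen l
    · -- the key already has a group: A mutates it in place, the seen list is unchanged
      have hcont : (l.foldl pvStep PySem.Dict.empty).contains (pvKeyA x.2) = true := by
        rw [PySem.Dict.contains_iff_mem_keys _ _, hkeys]; exact hmem
      have hgetD : (l.foldl pvStep PySem.Dict.empty).getD (pvKeyA x.2) PySem.Dict.empty
          = pvGroup l (pvKeyA x.2) := by
        exact PySem.Dict.getD_of_mem_items _
          (by rw [ih]; exact List.mem_map.mpr ⟨_, hmem, rfl⟩)
          (by rw [hkeys]; exact hnodup) _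
      have hseen : pvSeen (l ++ [x]) = pvSeen l := by
        rw [pvSeen_snoc]; simp [PySem.Set.add, hmem]
      rw [hseen]
      simp only [pvStep, hcont, if_pos, PySem.Dict.modify, hgetD]
      rw [PySem.Dict.items_insert_of_contains _ _ hcont, ih, List.map_map]
      apply List.map_congr_left
      intro key' hk'
      simp only [Function.comp_apply]
      by_cases h : key' = pvKeyA x.2
      · subst h; simp [pvGroup_snoc]
      · have hb : (key' == pvKeyA x.2) = false := by simpa using h
        have hb2 : (pvKeyA x.2 == key') = false := by simpa using (Ne.symm h)
        simp [hb, pvGroup_snoc, hb2]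
    · -- a fresh key: A appends a new singleton group, the seen list grows by the key
      have hcont : (l.foldl pvStep PySem.Dict.empty).contains (pvKeyA x.2) = false := by
        rw [← hkeys] at hmem
        cases hc : (l.foldl pvStep PySem.Dict.empty).contains (pvKeyA x.2)
        · rfl
        · exact absurd ((PySem.Dict.contains_iff_mem_keys _ _).mp hc) hmem
      have hseen : pvSeen (l ++ [x]) = pvSeen l ++ [pvKeyA x.2] := by
        rw [pvSeen_snoc]; simp [PySem.Set.add, hmem]
      have hne : ∀ p ∈ (l.foldl pvStep PySem.Dict.empty).items, p.1 ≠ pvKeyA x.2 := by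
        intro p hp h
        exact hmem (by rw [← hkeys]; exact h ▸ PySem.Dict.mem_keys_of_mem_items _ hp)
      rw [hseen]
      simp only [pvStep, hcont, Bool.false_eq_true, if_neg, not_false_eq_true, PySem.Dict.modify,
        PySem.Dict.getD_insert_self]
      rw [PySem.Dict.items_insert_of_contains _ _ (PySem.Dict.contains_insert_self _ _ _),
        PySem.Dict.items_insert_of_not_contains _ _ hcont, List.map_append, List.map_append]
      congr 1
      · -- existing groups are untouched
        have hid : ∀ p ∈ (l.foldl pvStep PySem.Dict.empty).items,
            (fun p => if p.1 == pvKeyA x.2 then (pvKeyA x.2, PySem.Dict.empty.insert x.1 x.2) else p) p = p := by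
          intro p hp
          have : (p.1 == pvKeyA x.2) = false := by simpa using hne p hp
          simp [this]
        rw [List.map_congr_left hid, List.map_id', ih]
        apply List.map_congr_left
        intro key' hk'
        have hb : (pvKeyA x.2 == key') = false := by
          simp only [beq_eq_false_iff_ne, ne_eq]
          intro h
          exact hmem (h ▸ hk')
        simp [pvGroup_snoc, hb]
      · simp [pvGroup_snoc, pvGroup_empty_of_not_mem l _ hmem]

-- ---- B-side lemmas ----

theorem pvDiscardOfList (ys : List String) (a : String) :
    PySem.Set.discard (PySem.Set.ofList ys) a = PySem.Set.ofList (ys.filter (fun y => !(y == a))) := by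
  have hdis : ∀ (s : List String) (x : String),
      PySem.Set.discard s x = s.filter (fun z => !(z == x)) := fun _ _ => rfl
  induction ys with
  | nil => rfl
  | cons y t ih =>
    have ih' : List.filter (fun z => !(z == a)) (PySem.Set.ofList t)
        = PySem.Set.ofList (t.filter (fun z => !(z == a))) := by
      rw [← hdis]; exact ih
    rw [PySem.Set.ofList_cons, List.filter_cons]
    by_cases h : y = a
    · subst h
      simp only [beq_self_eq_true, Bool.not_true, Bool.false_eq_true, if_false]
      rw [hdis, hdis, List.filter_cons]
      simp only [beq_self_eq_true, Bool.not_true, Bool.false_eq_true, if_false]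
      rw [List.filter_filter]
      simp only [Bool.and_self]
      exact ih'
    · have hba : (y == a) = false := by simp [h]
      simp only [hdis, hba, Bool.not_false, if_true, List.filter_cons]
      rw [PySem.Set.ofList_cons]
      simp only [hdis]
      rw [← ih', List.filter_filter, List.filter_filter]
      simp [Bool.and_comm]

theorem pvSeen_cons (x : String × List (String × List (String × String)))
    (xs : List (String × List (String × List (String × String)))) :
    pvSeen (x :: xs) =
      pvKeyA x.2 :: pvSeen ((x :: xs).filter (fun kv => !(pvKeyA kv.2 == pvKeyA x.2))) := by
  simp only [pvSeen, PySem.List.dedup_eq_ofList]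
  have hmapfil : ((x :: xs).filter (fun kv => !(pvKeyA kv.2 == pvKeyA x.2))).map
      (fun kv => pvKeyA kv.2)
      = ((x :: xs).map (fun kv => pvKeyA kv.2)).filter (fun y => !(y == pvKeyA x.2)) := by
    rw [List.filter_map]
    rfl
  rw [hmapfil, List.map_cons, List.filter_cons]
  simp only [beq_self_eq_true, Bool.not_true, Bool.false_eq_true, if_false]
  rw [PySem.Set.ofList_cons, pvDiscardOfList]

theorem pvGroup_rest (l : List (String × List (String × List (String × String))))
    (k0 key : String) (h : ¬ key = k0) :
    pvGroup (l.filter (fun kv => !(pvKeyA kv.2 == k0))) key = pvGroup l key := by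
  unfold pvGroup
  rw [List.filter_filter]
  congr 1
  apply List.filter_congr
  intro kv _
  by_cases hk : pvKeyA kv.2 = key
  · simp [hk, h]
  · simp [hk]

theorem pvGoItemsAux (n : Nat) : ∀ l, l.length ≤ n →
    (pvGo l).items = (pvSeen l).map (fun key => (key, pvGroup l key)) := by
  induction n with
  | zero =>
    intro l hl
    have h0 : l = [] := List.eq_nil_of_length_eq_zero (Nat.le_zero.mp hl)
    subst h0
    rw [show pvGo [] = PySem.Dict.empty from by rw [pvGo]]
    rfl
  | succ n ih =>
    intro l hl
    match l with
    | [] =>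
      rw [show pvGo [] = PySem.Dict.empty from by rw [pvGo]]
      rfl
    | x :: xs =>
      have hstep : pvGo (x :: xs) = PySem.Dict.update
          (PySem.Dict.empty.insert (pvKeyB x.2)
            (((x :: xs).filter (fun kv => pvKeyB kv.2 == pvKeyB x.2)).foldl
              (fun g kv => g.insert kv.1 kv.2) PySem.Dict.empty))
          (pvGo ((x :: xs).filter (fun kv => !(pvKeyB kv.2 == pvKeyB x.2)))).items := by
        rw [pvGo]
      rw [hstep]
      simp only [pvKeyB_eq]
      set k0 := pvKeyA x.2 with hk0
      set rest := (x :: xs).filter (fun kv => !(pvKeyA kv.2 == k0)) with hrest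
      set grouped := ((x :: xs).filter (fun kv => pvKeyA kv.2 == k0)).foldl
        (fun g kv => g.insert kv.1 kv.2) PySem.Dict.empty with hgrouped
      have hrl : rest.length ≤ n := by
        rw [hrest, List.filter_cons]
        have hh : (!(pvKeyA x.2 == k0)) = false := by rw [hk0]; simp
        simp only [hh, Bool.false_eq_true, if_false]
        exact le_trans (List.length_filter_le _ _) (Nat.succ_le_succ_iff.mp hl)
      have hIH := ih rest hrl
      have hknotin : ∀ key ∈ pvSeen rest, ¬ key = k0 := by
        intro key hkey
        simp only [pvSeen, PySem.List.mem_dedup, List.mem_map] at hkey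
        obtain ⟨kv, hkv, rfl⟩ := hkey
        have hp := (List.mem_filter.mp hkv).2
        simpa using hp
      have hfresh : ∀ p ∈ (pvGo rest).items,
          (PySem.Dict.empty.insert k0 grouped).contains p.1 = false := by
        intro p hp
        have hmem : p.1 ∈ pvSeen rest := by
          rw [hIH] at hp
          obtain ⟨key, hkey, hpe⟩ := List.mem_map.mp hp
          rw [← hpe]; exact hkey
        rw [PySem.Dict.contains_insert]
        simp [hknotin p.1 hmem]
      have hnodup : ((pvGo rest).items.map Prod.fst).Nodup := by
        rw [hIH, List.map_map]
        have hid : ((pvSeen rest).map (Prod.fst ∘ fun key => (key, pvGroup rest key)))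
            = pvSeen rest := by simp [Function.comp_def]
        rw [hid]
        exact PySem.List.nodup_dedup _
      have hupd : ∀ (d : PySem.Dict String (PySem.Dict String (List (String × List (String × String)))))
          (ps : List (String × PySem.Dict String (List (String × List (String × String))))),
          PySem.Dict.update d ps = ps.foldl (fun d p => d.insert p.1 p.2) d := fun _ _ => rfl
      rw [hupd, PySem.Dict.items_foldl_insert_fresh (pvGo rest).items Prod.fst Prod.snd
        (PySem.Dict.empty.insert k0 grouped) hfresh hnodup]
      have hbase : (PySem.Dict.empty.insert k0 grouped).items = [(k0, grouped)] := rfl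
      rw [hbase, hIH, List.map_map, pvSeen_cons, ← hk0, ← hrest, List.map_cons]
      have hhead : grouped = pvGroup (x :: xs) k0 := rfl
      rw [List.singleton_append, hhead]
      congr 1
      apply List.map_congr_left
      intro key hkey
      simp only [Function.comp_apply]
      rw [pvGroup_rest _ _ _ (hknotin key hkey)]

-- B's recursion computes the same table
theorem pvGoItems (l : List (String × List (String × List (String × String)))) :
    (pvGo l).items = (pvSeen l).map (fun key => (key, pvGroup l key)) :=
  pvGoItemsAux l.length l (le_refl _)

theorem json2langgroup_spec : Claim_equal_json2langgroup := by
  intro data _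
  unfold Spec_json2langgroup
  show json2langgroup data = json2langgroup_alt data
  unfold json2langgroup json2langgroup_alt
  show ((data.foldl pvStep PySem.Dict.empty).items.map (fun p => (p.1, p.2.items))) = _
  rw [pvInv, pvGoItems]
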